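-- pv_equiv track=rewrite | github.com/oriasegal/Python_Programs | ex03/e3q7.py | twinp
-- ===== SOURCE A (Python) =====
-- def napa(n):
--     prime = [True] * n
--     prime[0] = False
--     for i in range(2, n):
--         if prime[i]:
--             for mlt in range(i * 2, n, i):
--                 prime[mlt] = False
--     r = []
--     for i, item in enumerate(prime):
--         if item:
--             r.append(i)
--     return r
--
-- def twinp(n):
--     x = napa(int(n))
--
--     def tpRec(twins, i, x):
--         if i == len(x):
--             return twins
--         else:
--             if x[i] + 2 in x:
--                 twins.append(str(x[i] + 2))
--                 return tpRec(twins, i + 1, x)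
--             else:
--                 twins.append(False)
--                 return tpRec(twins, i + 1, x)
--
--     twins = tpRec([], 0, x)
--
--     for i in range(len(twins)):
--         if not twins[i]:
--             twins[i] = 'no twin'
--     D = dict(zip(x, twins))
--     return D
-- ===== SOURCE B (Python) =====
-- def twinp(n):
--     n = int(n)
--     sieve = [True] * n
--     sieve[0] = False
--     for i in range(2, n):
--         if sieve[i]:
--             for m in range(i * 2, n, i):
--                 sieve[m] = False
--     res = {}
--     for i in range(n):
--         if sieve[i]:
--             res[i] = str(i + 2) if i + 2 < n and sieve[i + 2] else 'no twin'
--     return res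
-- ===== Notes on version B (the rewrite author's own statement) =====
-- stated objective: faster
-- what changed: Keeps the sieve but replaces A's recursive tpRec with its O(len(x)) `p+2 in x` list scan per prime, the separate False->'no twin' fixup pass and the zip/dict pass by one direct loop over the sieve array that builds the result dict with an O(1) array test per index.
import Mathlib
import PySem

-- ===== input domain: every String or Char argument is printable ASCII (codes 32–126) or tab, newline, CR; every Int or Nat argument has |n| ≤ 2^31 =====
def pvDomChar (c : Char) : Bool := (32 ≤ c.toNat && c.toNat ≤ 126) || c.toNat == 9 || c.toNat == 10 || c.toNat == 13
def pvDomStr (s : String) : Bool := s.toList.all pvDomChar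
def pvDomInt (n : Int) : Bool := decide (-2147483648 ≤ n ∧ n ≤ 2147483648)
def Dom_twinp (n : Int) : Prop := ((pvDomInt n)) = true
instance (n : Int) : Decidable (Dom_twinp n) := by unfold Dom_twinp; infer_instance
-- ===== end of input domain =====

-- B replaces A's recursive twin search with list-membership scans, the False→'no twin' fixup
-- pass and the zip/dict pass by one direct loop over the sieve array building the dict; the
-- inner `p+2 in x` list scan disappears (O(1) array test), which is the speed mechanism.

-- ===== PORT A =====
-- sieve: prime = [True]*n; prime[0] = False; for i in range(2,n): if prime[i]: for mlt in range(i*2,n,i): prime[mlt]=False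
-- then r = [i for i,item in enumerate(prime) if item]
def napa (n : Int) : List Int :=
  let prime := (Array.replicate n.toNat true).set! 0 false
  let prime := (PySem.List.pyRange 2 n).foldl (fun prime i =>
      if prime[i.toNat]! = true then
        (PySem.List.pyRange (i * 2) n i).foldl (fun p mlt => p.set! mlt.toNat false) prime
      else prime) prime
  (List.range prime.size).foldl (fun (r : List Int) (i : Nat) => if prime[i]! = true then r ++ [(i : Int)] else r) []

-- tpRec: Python's `twins` list holds str or False; we model those entries as Option String.
-- Python tests `i == len(x)`; on every reachable call i ≤ len(x), so `i < len(x)` below is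
-- the same test (and gives termination).  x[i] is in range in the else-branch: x.getD i 0.
def tpRec (twins : List (Option String)) (i : Nat) (x : List Int) : List (Option String) :=
  if h : i < x.length then
    if (x.getD i 0 + 2) ∈ x then
      tpRec (twins ++ [some (PySem.Int.toStr (x.getD i 0 + 2))]) (i + 1) x
    else
      tpRec (twins ++ [none]) (i + 1) x
  else twins
termination_by x.length - i

def twinp (n : Int) : List (Int × String) :=
  let x := napa n            -- int(n) is the identity on int input
  let twins := tpRec [] 0 x
  -- for i in range(len(twins)): if not twins[i]: twins[i] = 'no twin'
  let twins := twins.map (fun t => match t with | some s => s | none => "no twin")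
  (PySem.Dict.ofList (x.zip twins)).items   -- D = dict(zip(x, twins))

-- ===== PORT B =====
-- same sieve, then one loop: res[i] = str(i+2) if i+2 < n and sieve[i+2] else 'no twin'
def twinp_alt (n : Int) : List (Int × String) :=
  let sieve := (Array.replicate n.toNat true).set! 0 false
  let sieve := (PySem.List.pyRange 2 n).foldl (fun sieve i =>
      if sieve[i.toNat]! = true then
        (PySem.List.pyRange (i * 2) n i).foldl (fun s m => s.set! m.toNat false) sieve
      else sieve) sieve
  ((PySem.List.pyRange 0 n).foldl (fun res i =>
      if sieve[i.toNat]! = true then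
        res.insert i (if i + 2 < n ∧ sieve[(i + 2).toNat]! = true
                      then PySem.Int.toStr (i + 2) else "no twin")
      else res) PySem.Dict.empty).items

-- ===== PRECONDITION & SPEC =====
-- A executes prime[0] = False on a list of length n, so it raises IndexError for n ≤ 0;
-- Pre_ excludes exactly those inputs and nothing else.
def Pre_twinp (n : Int) : Prop := 1 ≤ n
instance (n : Int) : Decidable (Pre_twinp n) := by unfold Pre_twinp; infer_instance
def pvWitness_twinp : Int := 12

def Spec_twinp (n : Int) (out : List (Int × String)) : Prop := out = twinp_alt n
instance (n : Int) (out : List (Int × String)) : Decidable (Spec_twinp n out) := by unfold Spec_twinp; infer_instance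

-- ===== CLAIM (what is proved, stated in full; the proofs are below) =====
def Claim_equal_twinp : Prop := ∀ (n : Int), Dom_twinp n → Pre_twinp n → Spec_twinp n (twinp n)

-- ===== LEMMAS AND PROOFS =====

-- the sieve array both ports compute (identical code in both)
def pvS (n : Int) : Array Bool :=
  (PySem.List.pyRange 2 n).foldl (fun prime i =>
      if prime[i.toNat]! = true then
        (PySem.List.pyRange (i * 2) n i).foldl (fun p mlt => p.set! mlt.toNat false) prime
      else prime) ((Array.replicate n.toNat true).set! 0 false)

lemma size_setFold (l : List Int) (a : Array Bool) :
    (l.foldl (fun p mlt => p.set! mlt.toNat false) a).size = a.size := by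
  induction l generalizing a with
  | nil => rfl
  | cons x t ih => rw [List.foldl_cons, ih, Array.size_set!]

lemma size_sieveFold (n : Int) (l : List Int) (a : Array Bool) :
    (l.foldl (fun prime i =>
      if prime[i.toNat]! = true then
        (PySem.List.pyRange (i * 2) n i).foldl (fun p mlt => p.set! mlt.toNat false) prime
      else prime) a).size = a.size := by
  induction l generalizing a with
  | nil => rfl
  | cons x t ih =>
    rw [List.foldl_cons]
    by_cases hx : a[x.toNat]! = true
    · rw [if_pos hx, ih, size_setFold]
    · rw [if_neg hx, ih]

lemma pvS_size (n : Int) : (pvS n).size = n.toNat := by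
  unfold pvS
  rw [size_sieveFold, Array.size_set!, Array.size_replicate]

-- the list of sieve-surviving indices, as Ints
def pvX (n : Int) : List Int :=
  ((List.range n.toNat).filter (fun j => (pvS n)[j]!)).map (fun (j : Nat) => (j : Int))

lemma napa_eq (n : Int) : napa n = pvX n := by
  show (List.range (pvS n).size).foldl
      (fun (r : List Int) (i : Nat) => if (pvS n)[i]! = true then r ++ [(i : Int)] else r) [] = pvX n
  rw [pvS_size, PySem.List.foldl_append_if (fun i => (pvS n)[i]!) (fun (i : Nat) => (i : Int)),
    List.nil_append]
  rfl

lemma tpRec_eq (x : List Int) (i : Nat) (twins : List (Option String)) :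
    tpRec twins i x = twins ++ (x.drop i).map
      (fun p => if (p + 2) ∈ x then some (PySem.Int.toStr (p + 2)) else none) := by
  rw [tpRec]
  split
  · next h =>
    rw [List.drop_eq_getElem_cons h, List.getD_eq_getElem x 0 h]
    by_cases hin : (x[i] + 2) ∈ x
    · rw [if_pos hin, tpRec_eq x (i + 1), List.map_cons, if_pos hin, List.append_assoc,
        List.singleton_append]
    · rw [if_neg hin, tpRec_eq x (i + 1), List.map_cons, if_neg hin, List.append_assoc,
        List.singleton_append]
  · next h =>
    rw [List.drop_eq_nil_iff.mpr (by omega)]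
    simp
termination_by x.length - i

lemma mem_pvX (n : Int) (k : Nat) : ((k : Int) ∈ pvX n) ↔ (k < n.toNat ∧ (pvS n)[k]! = true) := by
  simp [pvX, List.mem_filter, Nat.cast_inj]

lemma nodup_pvX (n : Int) : (pvX n).Nodup := by
  unfold pvX
  refine List.Nodup.map (fun a b hab => ?_) ((List.nodup_range).filter _)
  exact_mod_cast hab

lemma zip_self_map {A B : Type} (l : List A) (g : A → B) :
    l.zip (l.map g) = l.map (fun a => (a, g a)) := by
  induction l with
  | nil => rfl
  | cons a t ih => simp [ih]

-- canonical form both ports are reduced to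
def pvTarget (n : Int) : List (Int × String) :=
  ((List.range n.toNat).filter (fun (j : Nat) => (pvS n)[j]!)).map
    (fun (j : Nat) => ((j : Int), if (j : Int) + 2 < n ∧ (pvS n)[j + 2]! = true
                          then PySem.Int.toStr ((j : Int) + 2) else "no twin"))

lemma map_pvX {A : Type} (n : Int) (G : Int → A) :
    (pvX n).map G =
      ((List.range n.toNat).filter (fun j => (pvS n)[j]!)).map (fun (j : Nat) => G (j : Int)) := by
  unfold pvX
  rw [List.map_map]
  rfl

lemma cond_iff (n : Int) (j : Nat) :
    (((j : Int) + 2) ∈ pvX n) ↔ ((j : Int) + 2 < n ∧ (pvS n)[j + 2]! = true) := by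
  rw [show ((j : Int) + 2) = ((j + 2 : Nat) : Int) from by push_cast; ring, mem_pvX]
  constructor
  · rintro ⟨h1, h2⟩
    exact ⟨by omega, h2⟩
  · rintro ⟨h1, h2⟩
    exact ⟨by omega, h2⟩

lemma target_eq (n : Int) : pvTarget n = (pvX n).map
    (fun p => (p, if (p + 2) ∈ pvX n then PySem.Int.toStr (p + 2) else "no twin")) := by
  rw [map_pvX]
  unfold pvTarget
  apply List.map_congr_left
  intro j hj
  simp only [cond_iff]

lemma twinp_eq_target (n : Int) : twinp n = pvTarget n := by
  show (PySem.Dict.ofList ((napa n).zip ((tpRec [] 0 (napa n)).map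
      (fun t => match t with | some s => s | none => "no twin")))).items = pvTarget n
  rw [tpRec_eq, List.drop_zero, List.nil_append, List.map_map, napa_eq]
  have hcol : ((fun t => match t with | some s => s | none => "no twin") ∘
      (fun p => if (p + 2) ∈ pvX n then some (PySem.Int.toStr (p + 2)) else none)) =
      (fun p => if (p + 2) ∈ pvX n then PySem.Int.toStr (p + 2) else "no twin") := by
    funext p
    by_cases hp : (p + 2) ∈ pvX n <;> simp [hp]
  rw [hcol, zip_self_map]
  have hnod : (((pvX n).map (fun p =>
      (p, if (p + 2) ∈ pvX n then PySem.Int.toStr (p + 2) else "no twin"))).map Prod.fst).Nodup := by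
    simpa [List.map_map, Function.comp_def] using nodup_pvX n
  have hfold := PySem.Dict.items_foldl_insert_fresh
      ((pvX n).map (fun p => (p, if (p + 2) ∈ pvX n then PySem.Int.toStr (p + 2) else "no twin")))
      Prod.fst Prod.snd PySem.Dict.empty
      (fun a _ => PySem.Dict.contains_empty _) hnod
  show ((PySem.Dict.empty.update _).items) = pvTarget n
  rw [PySem.Dict.update]
  rw [show (fun (acc : PySem.Dict Int String) (p : Int × String) => acc.insert p.1 p.2) =
      (fun d a => d.insert (Prod.fst a) (Prod.snd a)) from rfl, hfold]
  rw [show (PySem.Dict.empty : PySem.Dict Int String).items = [] from rfl, List.nil_append,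
    show (fun (a : Int × String) => (a.1, a.2)) = id from funext fun a => rfl, List.map_id,
    target_eq]

lemma twinp_alt_eq_target (n : Int) (h : 1 ≤ n) : twinp_alt n = pvTarget n := by
  have hn : ((n.toNat : Int)) = n := Int.toNat_of_nonneg (by omega)
  show ((PySem.List.pyRange 0 n).foldl (fun res i =>
      if (pvS n)[i.toNat]! = true then
        res.insert i (if i + 2 < n ∧ (pvS n)[(i + 2).toNat]! = true
                      then PySem.Int.toStr (i + 2) else "no twin")
      else res) PySem.Dict.empty).items = pvTarget n
  have hrange : PySem.List.pyRange 0 n = (List.range n.toNat).map (fun (k : Nat) => (k : Int)) := by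
    conv_lhs => rw [← hn]
    exact PySem.List.pyRange_zero_natCast _
  rw [hrange, ← List.foldl_filter, List.filter_map]
  have hpred : ((fun (i : Int) => (pvS n)[i.toNat]!) ∘ (fun (k : Nat) => (k : Int))) =
      (fun (j : Nat) => (pvS n)[j]!) := by
    funext j
    simp
  rw [hpred]
  have hnd : ((((List.range n.toNat).filter (fun j => (pvS n)[j]!)).map
      (fun (k : Nat) => (k : Int))).map (fun (i : Int) => i)).Nodup := by
    rw [List.map_map]
    refine List.Nodup.map (fun a b hab => ?_) ((List.nodup_range).filter _)
    simpa using hab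
  have hfold := PySem.Dict.items_foldl_insert_fresh
      (((List.range n.toNat).filter (fun j => (pvS n)[j]!)).map (fun (k : Nat) => (k : Int)))
      (fun (i : Int) => i)
      (fun (i : Int) => if i + 2 < n ∧ (pvS n)[(i + 2).toNat]! = true
                        then PySem.Int.toStr (i + 2) else "no twin")
      PySem.Dict.empty (fun a _ => PySem.Dict.contains_empty _) hnd
  rw [show (fun (res : PySem.Dict Int String) (i : Int) =>
        res.insert i (if i + 2 < n ∧ (pvS n)[(i + 2).toNat]! = true
                      then PySem.Int.toStr (i + 2) else "no twin")) =
      (fun (d : PySem.Dict Int String) (a : Int) => d.insert ((fun (i : Int) => i) a)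
        ((fun (i : Int) => if i + 2 < n ∧ (pvS n)[(i + 2).toNat]! = true
                           then PySem.Int.toStr (i + 2) else "no twin") a)) from rfl, hfold]
  rw [show (PySem.Dict.empty : PySem.Dict Int String).items = [] from rfl, List.nil_append,
    List.map_map]
  unfold pvTarget
  apply List.map_congr_left
  intro j hj
  have ht : (((j : Int) + 2).toNat) = j + 2 := by omega
  simp only [Function.comp_def, ht]

-- ===== VERDICT (by name: the statement is the Claim_ definition above) =====
theorem twinp_spec : Claim_equal_twinp := by
  intro n _ hPre
  unfold Spec_twinp
  rw [twinp_eq_target n, twinp_alt_eq_target n hPre]
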